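-- pv_equiv track=rewrite | github.com/RTodorinov/SoftUni | Programming Fundamentals with Python/16.2Lists Advanced - exercise/1.which_are_in.py | find_substrings
-- ===== SOURCE A (Python) =====
-- def find_substrings(first_sequence, second_sequence):
--     substrings = []
--     for element in first_sequence:
--         for second_element in second_sequence:
--             if element in second_element:
--                 substrings.append(element)
--                 break
--     return substrings
-- ===== SOURCE B (Python) =====
-- def find_substrings(first_sequence, second_sequence):
--     # Inverted traversal: keep the deduplicated patterns that have NOT yet been
--     # seen in any text; each text filters that pending list once, stopping early
--     # when it is empty.  What survives is exactly the unmatched patterns, so the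
--     # answer is first_sequence filtered by non-membership in that leftover set.
--     pending = list(dict.fromkeys(first_sequence))
--     for text in second_sequence:
--         if not pending:
--             break
--         pending = [element for element in pending if element not in text]
--     unmatched = set(pending)
--     return [element for element in first_sequence if element not in unmatched]
-- ===== Notes on version B (the rewrite author's own statement) =====
-- stated objective: alternative
-- what changed: B inverts the loop nesting: it scans each second-sequence text once against a shrinking deduplicated list of still-pending patterns (moving hits into a matched set and stopping early when nothing is pending) and produces the result by a final membership filter over first_sequence, instead of A's per-pattern scan of the texts with append-and-break.
import Mathlib
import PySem

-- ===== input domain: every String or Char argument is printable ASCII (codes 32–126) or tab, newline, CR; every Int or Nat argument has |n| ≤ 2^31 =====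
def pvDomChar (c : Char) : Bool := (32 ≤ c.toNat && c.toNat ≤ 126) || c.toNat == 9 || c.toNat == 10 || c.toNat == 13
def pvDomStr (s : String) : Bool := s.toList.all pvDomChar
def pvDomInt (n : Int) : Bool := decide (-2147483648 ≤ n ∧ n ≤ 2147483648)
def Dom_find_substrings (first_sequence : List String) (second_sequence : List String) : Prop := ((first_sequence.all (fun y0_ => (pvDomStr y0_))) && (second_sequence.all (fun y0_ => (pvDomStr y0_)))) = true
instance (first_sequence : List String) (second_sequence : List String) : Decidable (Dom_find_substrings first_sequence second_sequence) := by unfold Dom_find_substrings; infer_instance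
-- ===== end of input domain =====

-- B inverts the loop nesting (one scan per text, matches kept in a set, final membership
-- filter over first_sequence) instead of A's per-pattern scan with append-and-break;
-- same asymptotic cost, genuinely different traversal (objective: alternative).


-- ===== PORT A =====
-- inner 'for second_element in second_sequence: if element in second_element: append; break'
def findA_inner (element : String) (acc : List String) : List String → List String
  | [] => acc
  | t :: ts => if PySem.Str.isIn element t then acc ++ [element] else findA_inner element acc ts

def find_substrings (first_sequence : List String) (second_sequence : List String) : List String :=
  first_sequence.foldl (fun acc e => findA_inner e acc second_sequence) []

-- ===== PORT B =====
-- 'for text in second_sequence: if not pending: break; pending = [e for e in pending if e not in text]'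
def findB_pending (pending : List String) : List String → List String
  | [] => pending
  | text :: ts =>
    if pending = [] then pending
    else findB_pending (pending.filter (fun element => !PySem.Str.isIn element text)) ts

def find_substrings_alt (first_sequence : List String) (second_sequence : List String) : List String :=
  let pending := findB_pending (PySem.List.dedup first_sequence) second_sequence
  let unmatched := PySem.Set.ofList pending
  first_sequence.filter (fun element => !PySem.Set.contains unmatched element)

-- ===== PRECONDITION & SPEC =====
def Spec_find_substrings (first_sequence : List String) (second_sequence : List String) (out : List String) : Prop := out = find_substrings_alt first_sequence second_sequence
instance (first_sequence : List String) (second_sequence : List String) (out : List String) : Decidable (Spec_find_substrings first_sequence second_sequence out) := by unfold Spec_find_substrings; infer_instance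

-- ===== CLAIM (what is proved, stated in full; the proofs are below) =====
def Claim_equal_find_substrings : Prop := ∀ (first_sequence : List String) (second_sequence : List String), Dom_find_substrings first_sequence second_sequence → Spec_find_substrings first_sequence second_sequence (find_substrings first_sequence second_sequence)

-- ===== LEMMAS AND PROOFS =====

-- A's inner break-loop appends iff some text contains the element
theorem findA_inner_eq (e : String) (acc : List String) (ts : List String) :
    findA_inner e acc ts =
      if ts.any (fun t => PySem.Str.isIn e t) then acc ++ [e] else acc := by
  induction ts with
  | nil => simp [findA_inner]
  | cons t ts ih =>
    simp only [findA_inner, ih, List.any_cons, PySem.Str.isIn_eq]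
    by_cases h : PySem.Chars.isIn e.toList t.toList = true <;> simp [h]

-- A is a filter by "some text contains e"
theorem find_substrings_eq_filter (first second : List String) :
    find_substrings first second =
      first.filter (fun e => second.any (fun t => PySem.Str.isIn e t)) := by
  unfold find_substrings
  have h : ∀ (fs : List String) (acc : List String),
      fs.foldl (fun acc e => findA_inner e acc second) acc =
        acc ++ fs.filter (fun e => second.any (fun t => PySem.Str.isIn e t)) := by
    intro fs
    induction fs with
    | nil => intro acc; simp
    | cons e fs ih =>
      intro acc
      rw [List.foldl_cons, findA_inner_eq, List.filter_cons]
      by_cases h : (second.any fun t => PySem.Str.isIn e t) = true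
      · rw [if_pos h, if_pos h, ih]; simp
      · rw [if_neg h, if_neg h, ih]
  simpa using h first []

-- what survives B's early-exiting outer loop: the patterns no processed text contains
theorem findB_pending_mem (x : String) :
    ∀ (ts : List String) (pending : List String),
      x ∈ findB_pending pending ts ↔
        x ∈ pending ∧ ∀ t ∈ ts, PySem.Str.isIn x t = false := by
  intro ts
  induction ts with
  | nil => intro pending; simp [findB_pending]
  | cons t ts ih =>
    intro pending
    unfold findB_pending
    by_cases hp : pending = []
    · subst hp; simp
    · rw [if_neg hp]
      simp only [ih, List.mem_filter, Bool.not_eq_true', List.mem_cons]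
      constructor
      · rintro ⟨⟨hp', hni⟩, hall⟩
        refine ⟨hp', ?_⟩
        rintro t' (rfl | ht')
        · exact hni
        · exact hall t' ht'
      · rintro ⟨hp', hall⟩
        exact ⟨⟨hp', hall t (Or.inl rfl)⟩, fun t' ht' => hall t' (Or.inr ht')⟩

-- ===== VERDICT (by name: the statement is the Claim_ definition above) =====
theorem find_substrings_spec : Claim_equal_find_substrings := by
  intro first second _
  unfold Spec_find_substrings
  rw [find_substrings_eq_filter]
  unfold find_substrings_alt
  refine (List.filter_congr ?_).symm
  intro x hx
  have key : (!PySem.Set.contains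
      (PySem.Set.ofList (findB_pending (PySem.List.dedup first) second)) x) = true ↔
      (second.any fun t => PySem.Str.isIn x t) = true := by
    rw [Bool.not_eq_true', ← Bool.not_eq_true (PySem.Set.contains _ x)]
    rw [Bool.not_eq_true]
    constructor
    · intro h
      by_contra hany
      apply absurd h
      simp only [Bool.not_eq_false]
      rw [PySem.Set.contains_iff, PySem.Set.mem_ofList, findB_pending_mem]
      refine ⟨by simpa using hx, ?_⟩
      intro t ht
      rcases Bool.eq_false_or_eq_true (PySem.Str.isIn x t) with htr | hf
      · exact absurd (List.any_eq_true.mpr ⟨t, ht, htr⟩) hany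
      · exact hf
    · intro hany
      rw [Bool.eq_false_iff]
      intro hc
      rw [PySem.Set.contains_iff, PySem.Set.mem_ofList, findB_pending_mem] at hc
      rcases List.any_eq_true.mp hany with ⟨t, ht, hi⟩
      rw [hc.2 t ht] at hi
      exact Bool.noConfusion hi
  exact Bool.eq_iff_iff.mpr key
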